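-- pv_equiv track=rewrite | github.com/sarveshwarans/EducativeIO | 3. Pattern Two Pointers/3_2.py | removeAllInstanceOfKeyInPlace1
-- ===== SOURCE A (Python) =====
-- def removeAllInstanceOfKeyInPlace1(key,inputList):
--     firstNonKeyStartsHere=0
--     for i in range(len(inputList)):
--         if inputList[i]==key:
--             continue
--         else:
--             inputList[firstNonKeyStartsHere]=inputList[i]
--             firstNonKeyStartsHere+=1
--     return firstNonKeyStartsHere
-- ===== SOURCE B (Python) =====
-- def removeAllInstanceOfKeyInPlace1(key, inputList):
--     kept = [x for x in inputList if x != key]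
--     for i in range(len(kept)):
--         inputList[i] = kept[i]
--     return len(kept)
-- ===== Notes on version B (the rewrite author's own statement) =====
-- stated objective: simpler
-- what changed: Replaces A's single-pass write-pointer compaction (indexed loop with an in-place write cursor) by a two-pass survivor-list formulation: filter the non-key elements into an auxiliary list, copy them back into positions 0..k-1, and return its length.
import Mathlib
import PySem

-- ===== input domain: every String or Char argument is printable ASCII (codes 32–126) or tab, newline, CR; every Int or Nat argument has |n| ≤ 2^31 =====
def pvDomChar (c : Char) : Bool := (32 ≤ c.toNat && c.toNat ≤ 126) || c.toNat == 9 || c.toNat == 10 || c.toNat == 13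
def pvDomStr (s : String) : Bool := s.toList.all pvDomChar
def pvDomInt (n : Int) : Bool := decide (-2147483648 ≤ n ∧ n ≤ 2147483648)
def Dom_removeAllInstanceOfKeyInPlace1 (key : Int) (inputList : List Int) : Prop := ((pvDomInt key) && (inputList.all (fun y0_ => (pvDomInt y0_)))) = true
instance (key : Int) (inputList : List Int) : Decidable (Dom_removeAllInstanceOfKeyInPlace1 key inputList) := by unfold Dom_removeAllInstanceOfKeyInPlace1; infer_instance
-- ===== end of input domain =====

-- B replaces A's single-pass write-pointer compaction by a two-pass survivor-list-then-copy-back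
-- formulation (objective: simpler). Both Pythons mutate inputList the same way (positions 0..k-1 get
-- the survivors, the tail is untouched); the equivalence proved here is about the RETURN value.

-- ===== PORT A =====
-- A's loop body: state = (current list, write pointer); reads inputList[i] from the MUTATED list.
def pvStepA (key : Int) (st : List Int × Nat) (i : Int) : List Int × Nat :=
  match PySem.List.pyGet? st.1 i with
  | some v => if v = key then st else (st.1.set st.2 v, st.2 + 1)
  | none => st   -- unreachable: i ranges over valid indices and the length is preserved

def removeAllInstanceOfKeyInPlace1 (key : Int) (inputList : List Int) : Int :=
  (((PySem.List.pyRange 0 (inputList.length : Int) 1).foldl (pvStepA key) (inputList, 0)).2 : Nat)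

-- ===== PORT B =====
def removeAllInstanceOfKeyInPlace1_alt (key : Int) (inputList : List Int) : Int :=
  -- kept = [x for x in inputList if x != key]; the copy-back loop only mutates, return len(kept)
  ((inputList.filter (fun x => x != key)).length : Nat)

-- ===== PRECONDITION & SPEC =====
def Spec_removeAllInstanceOfKeyInPlace1 (key : Int) (inputList : List Int) (out : Int) : Prop := out = removeAllInstanceOfKeyInPlace1_alt key inputList
instance (key : Int) (inputList : List Int) (out : Int) : Decidable (Spec_removeAllInstanceOfKeyInPlace1 key inputList out) := by unfold Spec_removeAllInstanceOfKeyInPlace1; infer_instance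

-- ===== CLAIM (what is proved, stated in full; the proofs are below) =====
def Claim_equal_removeAllInstanceOfKeyInPlace1 : Prop := ∀ (key : Int) (inputList : List Int), Dom_removeAllInstanceOfKeyInPlace1 key inputList → Spec_removeAllInstanceOfKeyInPlace1 key inputList (removeAllInstanceOfKeyInPlace1 key inputList)

-- ===== LEMMAS AND PROOFS =====

-- Loop invariant for A: processing indices (n - rest.length)..n-1 on a list whose suffix from
-- position (n - rest.length) is still `rest` (the writes land strictly below the read index),
-- with write pointer k ≤ n - rest.length, adds countP (≠ key) rest to the pointer.
theorem pvLoopA_inv (key : Int) (n : Nat) (rest : List Int) :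
    ∀ (xs : List Int) (k : Nat), xs.length = n → k ≤ n - rest.length →
    xs.drop (n - rest.length) = rest →
    ((PySem.List.pyRange ((n - rest.length : Nat) : Int) (n : Int) 1).foldl (pvStepA key)
      (xs, k)).2 = k + rest.countP (fun x => x != key) := by
  induction rest with
  | nil =>
    intro xs k hlen hk hdrop
    simp
  | cons v t ih =>
    intro xs k hlen hk hdrop
    simp only [List.length_cons] at hk hdrop
    have hrl : t.length + 1 ≤ n := by
      have := congrArg List.length hdrop
      simp [hlen] at this; omega
    set i : Nat := n - (t.length + 1) with hi
    have hget : xs[i]? = some v := by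
      have h0 : (xs.drop i)[0]? = some v := by rw [hdrop]; rfl
      rw [List.getElem?_drop] at h0; simpa using h0
    have hcons : PySem.List.pyRange ((i : Nat) : Int) (n : Int) 1
        = (i : Int) :: PySem.List.pyRange ((i : Int) + 1) (n : Int) 1 :=
      PySem.List.pyRange_one_cons (by omega)
    have hdrop' : xs.drop (i + 1) = t := by
      have : (xs.drop i).drop 1 = t := by rw [hdrop]; rfl
      simpa [List.drop_drop, Nat.add_comm] using this
    have hi1 : (i : Int) + 1 = ((n - t.length : Nat) : Int) := by omega
    have hstep : pvStepA key (xs, k) (i : Int)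
        = if v = key then (xs, k) else (xs.set k v, k + 1) := by
      simp [pvStepA, pysem, hget]
    rw [show n - (v :: t).length = i from by simp [hi], hcons]
    simp only [List.foldl_cons, hstep]
    by_cases hv : v = key
    · rw [if_pos hv, hi1, ih xs k hlen (by omega) (by rw [show n - t.length = i + 1 from by omega]; exact hdrop')]
      simp [hv]
    · rw [if_neg hv, hi1,
        ih (xs.set k v) (k + 1) (by simp [hlen]) (by omega)
          (by rw [show n - t.length = (i + 1) from by omega, List.drop_set,
                if_pos (by omega : k < i + 1)]; exact hdrop')]
      have : (v != key) = true := by simp [hv]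
      simp [this]; omega

-- ===== VERDICT (by name: the statement is the Claim_ definition above) =====
theorem removeAllInstanceOfKeyInPlace1_spec : Claim_equal_removeAllInstanceOfKeyInPlace1 := by
  intro key inputList _
  unfold Spec_removeAllInstanceOfKeyInPlace1 removeAllInstanceOfKeyInPlace1 removeAllInstanceOfKeyInPlace1_alt
  have h := pvLoopA_inv key inputList.length inputList inputList 0 rfl (by omega) (by simp)
  simp only [Nat.sub_self, Nat.cast_zero] at h
  rw [h, List.countP_eq_length_filter]
  simp
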